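-- pv_equiv track=rewrite | github.com/kelvinhuang0327/number-pattern-research | tools/evaluate_115000011.py | method_tail_digit_coverage
-- ===== SOURCE A (Python) =====
-- from collections import Counter, defaultdict
--
-- MAX_NUM = 38       # Power Lotto main numbers: 1-38
--
-- def method_tail_digit_coverage(history):
--     """Tail digit coverage: Ensure diverse tail digits (0-9)."""
--     recent = history[-50:]
--     freq = Counter()
--     for d in recent:
--         for n in d['numbers']:
--             freq[n] += 1
--
--     tail_groups = defaultdict(list)
--     for n in range(1, MAX_NUM + 1):
--         tail = n % 10
--         tail_groups[tail].append((n, freq.get(n, 0)))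
--
--     bet = []
--     used_tails = set()
--     for tail in sorted(tail_groups.keys()):
--         if len(bet) < 6:
--             candidates = sorted(tail_groups[tail], key=lambda x: x[1], reverse=True)
--             if candidates and tail not in used_tails:
--                 bet.append(candidates[0][0])
--                 used_tails.add(tail)
--
--     # Fill remaining
--     all_sorted = sorted(range(1, MAX_NUM + 1), key=lambda x: freq.get(x, 0), reverse=True)
--     for n in all_sorted:
--         if n not in bet and len(bet) < 6:
--             bet.append(n)
--
--     return [sorted(bet[:6])], None, "Tail digit coverage (diverse last digits)"
-- ===== SOURCE B (Python) =====
-- from collections import Counter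
--
-- MAX_NUM = 38       # Power Lotto main numbers: 1-38
--
-- def method_tail_digit_coverage(history):
--     """Tail digit coverage: pick, for each tail digit 0-5, the most frequent
--     number with that tail (smallest on ties) -- no grouping dict, no sorting
--     passes, no fill loop: the bet is always exactly these six numbers."""
--     freq = Counter()
--     for d in history[-50:]:
--         for n in d['numbers']:
--             freq[n] += 1
--     bet = [max((n for n in range(1, MAX_NUM + 1) if n % 10 == t),
--                key=lambda n: freq.get(n, 0))
--            for t in range(6)]
--     return [sorted(bet)], None, "Tail digit coverage (diverse last digits)"
-- ===== Notes on version B (the rewrite author's own statement) =====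
-- stated objective: simpler
-- what changed: Replaces the tail-groups dict, ten per-group sorts, the used_tails set, the global ranking sort and the fill loop by a direct per-tail argmax: the bet is provably always the six per-tail (0-5) most-frequent numbers (smallest on ties), so B just takes max(..., key=freq) for each of the six tails and sorts them.
import Mathlib
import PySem

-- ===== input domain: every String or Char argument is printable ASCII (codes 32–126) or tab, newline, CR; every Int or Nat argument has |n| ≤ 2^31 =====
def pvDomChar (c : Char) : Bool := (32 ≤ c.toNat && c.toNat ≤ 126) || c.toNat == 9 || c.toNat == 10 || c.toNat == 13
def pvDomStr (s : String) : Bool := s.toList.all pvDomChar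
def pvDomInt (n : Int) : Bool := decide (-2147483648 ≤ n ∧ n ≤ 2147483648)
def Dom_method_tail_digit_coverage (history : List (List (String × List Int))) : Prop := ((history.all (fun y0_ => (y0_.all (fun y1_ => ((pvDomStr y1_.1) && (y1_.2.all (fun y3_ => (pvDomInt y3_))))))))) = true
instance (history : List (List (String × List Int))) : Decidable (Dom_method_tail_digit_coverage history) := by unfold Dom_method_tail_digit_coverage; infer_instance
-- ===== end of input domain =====

-- B replaces A's tail-groups dict, per-group sorts, used_tails set, global ranking and fill
-- loop by a direct per-tail argmax (objective: simpler); equal output on all of Pre_.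

-- ===== PORT A =====
-- freq = Counter(); for d in history[-50:]: for n in d['numbers']: freq[n] += 1
-- (d['numbers'] via get? with getD []: exact whenever the key exists, which Pre_ guarantees)
def pvFreqA (history : List (List (String × List Int))) : PySem.Dict Int Int :=
  (PySem.List.slice history (some (-50)) none).foldl (fun f d =>
    ((PySem.Dict.get? (PySem.Dict.mk d) "numbers").getD []).foldl
      (fun f n => PySem.Dict.insert f n (PySem.Dict.getD f n 0 + 1)) f) PySem.Dict.empty

-- body of A's 'for tail in sorted(tail_groups.keys())' loop; state = (bet, used_tails)
def pvStepA (tail_groups : PySem.Dict Int (List (Int × Int)))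
    (st : List Int × PySem.Set Int) (tail : Int) : List Int × PySem.Set Int :=
  if st.1.length < 6 then
    let candidates := PySem.List.sorted (PySem.Dict.getD tail_groups tail []) (fun x => x.2) true
    if candidates ≠ [] ∧ ¬ (PySem.Set.contains st.2 tail = true) then
      (st.1 ++ [candidates.headI.1], PySem.Set.add st.2 tail)
    else st
  else st

def pvPickA (freq : PySem.Dict Int Int) : List (List Int) × Option Int × String :=
  let tail_groups : PySem.Dict Int (List (Int × Int)) :=
    (PySem.List.pyRange 1 (38+1) 1).foldl (fun tg n =>
      PySem.Dict.modify tg (PySem.Int.mod n 10) [] (fun l => l ++ [(n, PySem.Dict.getD freq n 0)]))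
      PySem.Dict.empty
  let step := (PySem.List.sorted (PySem.Dict.keys tail_groups) (fun x => x) false).foldl
    (pvStepA tail_groups) (([], PySem.Set.empty) : List Int × PySem.Set Int)
  let all_sorted := PySem.List.sorted (PySem.List.pyRange 1 (38+1) 1)
      (fun x => PySem.Dict.getD freq x 0) true
  let bet2 := all_sorted.foldl
    (fun bet n => if ¬ (n ∈ bet) ∧ bet.length < 6 then bet ++ [n] else bet) step.1
  ([PySem.List.sorted (PySem.List.slice bet2 none (some 6)) (fun x => x) false], none,
   "Tail digit coverage (diverse last digits)")

def method_tail_digit_coverage (history : List (List (String × List Int))) :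
    List (List Int) × Option Int × String := pvPickA (pvFreqA history)

-- ===== PORT B =====
-- freq is computed by the same loop as in A: the shared helper pvFreqA is reused
-- bet = [max((n for n in 1..38 if n%10==t), key=freq.get(n,0)) for t in range(6)]
-- (max over a never-empty list; .getD 0 only discharges the Option)
def pvPickB (freq : PySem.Dict Int Int) : List (List Int) × Option Int × String :=
  let bet := (PySem.List.pyRange 0 6 1).map (fun t =>
    (PySem.List.max? ((PySem.List.pyRange 1 (38+1) 1).filter (fun n => PySem.Int.mod n 10 == t))
      (fun n => PySem.Dict.getD freq n 0)).getD 0)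
  ([PySem.List.sorted bet (fun x => x) false], none,
   "Tail digit coverage (diverse last digits)")

def method_tail_digit_coverage_alt (history : List (List (String × List Int))) :
    List (List Int) × Option Int × String := pvPickB (pvFreqA history)

-- ===== PRECONDITION & SPEC =====
-- Pre_ excludes exactly the inputs where A raises KeyError: a dict among the last 50
-- draws without the key 'numbers'.
def Pre_method_tail_digit_coverage (history : List (List (String × List Int))) : Prop :=
  ∀ d ∈ PySem.List.slice history (some (-50)) none, d.any (fun p => p.1 == "numbers") = true
instance (history : List (List (String × List Int))) : Decidable (Pre_method_tail_digit_coverage history) := by unfold Pre_method_tail_digit_coverage; infer_instance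

def pvWitness_method_tail_digit_coverage : (List (List (String × List Int))) :=
  [[("numbers", [3, 13, 25])], [("numbers", [7, 7, 20])]]

def Spec_method_tail_digit_coverage (history : List (List (String × List Int))) (out : List (List Int) × Option Int × String) : Prop := out = method_tail_digit_coverage_alt history
instance (history : List (List (String × List Int))) (out : List (List Int) × Option Int × String) : Decidable (Spec_method_tail_digit_coverage history out) := by unfold Spec_method_tail_digit_coverage; infer_instance

-- ===== CLAIM (what is proved, stated in full; the proofs are below) =====
def Claim_equal_method_tail_digit_coverage : Prop := ∀ (history : List (List (String × List Int))), Dom_method_tail_digit_coverage history → Pre_method_tail_digit_coverage history → Spec_method_tail_digit_coverage history (method_tail_digit_coverage history)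

-- ===== LEMMAS AND PROOFS =====

-- head of a stable descending sort of explicit (number, value) pairs = Python max by value
lemma pvPick3 (freq : PySem.Dict Int Int) (n1 n2 n3 : Int) :
    (PySem.List.sorted [(n1, PySem.Dict.getD freq n1 0), (n2, PySem.Dict.getD freq n2 0),
        (n3, PySem.Dict.getD freq n3 0)] (fun x => x.2) true).headI.1
      = (PySem.List.max? [n1, n2, n3] (fun n => PySem.Dict.getD freq n 0)).getD 0 := by
  simp only [PySem.List.sorted, PySem.List.max?, List.foldl]
  repeat rw [PySem.List.insertBy]
  all_goals repeat (first | omega | (split_ifs <;> simp_all [PySem.List.insertBy]))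

set_option maxHeartbeats 1000000 in
lemma pvPick4 (freq : PySem.Dict Int Int) (n1 n2 n3 n4 : Int) :
    (PySem.List.sorted [(n1, PySem.Dict.getD freq n1 0), (n2, PySem.Dict.getD freq n2 0),
        (n3, PySem.Dict.getD freq n3 0), (n4, PySem.Dict.getD freq n4 0)] (fun x => x.2) true).headI.1
      = (PySem.List.max? [n1, n2, n3, n4] (fun n => PySem.Dict.getD freq n 0)).getD 0 := by
  simp only [PySem.List.sorted, PySem.List.max?, List.foldl]
  repeat rw [PySem.List.insertBy]
  all_goals repeat (first | omega | (split_ifs <;> simp_all [PySem.List.insertBy]))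

-- A's fill loop does nothing once the bet already has 6 numbers
lemma pvFillNop (l bet : List Int) (h : ¬ bet.length < 6) :
    l.foldl (fun bet n => if ¬ (n ∈ bet) ∧ bet.length < 6 then bet ++ [n] else bet) bet = bet := by
  induction l generalizing bet with
  | nil => rfl
  | cons x xs ih => simp only [List.foldl_cons]; rw [if_neg (by tauto)]; exact ih bet h

lemma pvGroup (freq : PySem.Dict Int Int) (t : Int) (ns : List Int)
    (hf : (PySem.List.pyRange 1 (38+1) 1).filter (fun n => PySem.Int.mod n 10 == t) = ns) :
    PySem.Dict.getD ((PySem.List.pyRange 1 (38+1) 1).foldl (fun tg n =>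
        PySem.Dict.modify tg (PySem.Int.mod n 10) [] (fun l => l ++ [(n, PySem.Dict.getD freq n 0)]))
        PySem.Dict.empty) t []
      = ns.map (fun n => (n, PySem.Dict.getD freq n 0)) := by
  rw [show ((PySem.List.pyRange 1 (38+1) 1).foldl (fun tg n =>
        PySem.Dict.modify tg (PySem.Int.mod n 10) [] (fun l => l ++ [(n, PySem.Dict.getD freq n 0)]))
        PySem.Dict.empty)
      = (((PySem.List.pyRange 1 (38+1) 1).map (fun n => (PySem.Int.mod n 10, (n, PySem.Dict.getD freq n 0)))).foldl
          (fun d p => PySem.Dict.modify d p.1 [] (· ++ [p.2])) PySem.Dict.empty) from by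
        rw [List.foldl_map]]
  rw [PySem.Dict.getD_foldl_modify_append, List.filter_map]
  rw [show ((PySem.List.pyRange 1 (38+1) 1).filter
      ((fun p => p.1 == t) ∘ (fun n => (PySem.Int.mod n 10, (n, PySem.Dict.getD freq n 0))))) = ns from hf]
  simp [List.map_map, Function.comp]

lemma pvStep_hit (tg : PySem.Dict Int (List (Int × Int))) (bet : List Int) (used : PySem.Set Int)
    (tail : Int) (p : Int × Int) (ps : List (Int × Int))
    (hlen : bet.length < 6) (hg : PySem.Dict.getD tg tail [] = p :: ps)
    (hu : PySem.Set.contains used tail = false) :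
    pvStepA tg (bet, used) tail =
      (bet ++ [(PySem.List.sorted (p :: ps) (fun x => x.2) true).headI.1], PySem.Set.add used tail) := by
  simp only [pvStepA, hg]
  rw [if_pos hlen, if_pos]
  constructor
  · simp [PySem.List.sorted_eq_nil_iff]
  · simp only [PySem.Set.contains] at hu ⊢
    simp_all

lemma pvStep_full (tg : PySem.Dict Int (List (Int × Int))) (st : List Int × PySem.Set Int)
    (tail : Int) (h : ¬ st.1.length < 6) : pvStepA tg st tail = st := by
  simp only [pvStepA]; rw [if_neg h]


set_option maxHeartbeats 1000000 in
lemma pvPick_eq (freq : PySem.Dict Int Int) : pvPickA freq = pvPickB freq := by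
  simp only [pvPickA, pvPickB]
  have hg0 : PySem.Dict.getD ((PySem.List.pyRange 1 (38+1) 1).foldl (fun tg n =>
        PySem.Dict.modify tg (PySem.Int.mod n 10) [] (fun l => l ++ [(n, PySem.Dict.getD freq n 0)]))
        PySem.Dict.empty) 0 [] = [((10:Int), PySem.Dict.getD freq 10 0), ((20:Int), PySem.Dict.getD freq 20 0), ((30:Int), PySem.Dict.getD freq 30 0)] := by
    rw [pvGroup freq 0 [10,20,30] (by decide)]; rfl
  have hg1 : PySem.Dict.getD ((PySem.List.pyRange 1 (38+1) 1).foldl (fun tg n =>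
        PySem.Dict.modify tg (PySem.Int.mod n 10) [] (fun l => l ++ [(n, PySem.Dict.getD freq n 0)]))
        PySem.Dict.empty) 1 [] = [((1:Int), PySem.Dict.getD freq 1 0), ((11:Int), PySem.Dict.getD freq 11 0), ((21:Int), PySem.Dict.getD freq 21 0), ((31:Int), PySem.Dict.getD freq 31 0)] := by
    rw [pvGroup freq 1 [1,11,21,31] (by decide)]; rfl
  have hg2 : PySem.Dict.getD ((PySem.List.pyRange 1 (38+1) 1).foldl (fun tg n =>
        PySem.Dict.modify tg (PySem.Int.mod n 10) [] (fun l => l ++ [(n, PySem.Dict.getD freq n 0)]))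
        PySem.Dict.empty) 2 [] = [((2:Int), PySem.Dict.getD freq 2 0), ((12:Int), PySem.Dict.getD freq 12 0), ((22:Int), PySem.Dict.getD freq 22 0), ((32:Int), PySem.Dict.getD freq 32 0)] := by
    rw [pvGroup freq 2 [2,12,22,32] (by decide)]; rfl
  have hg3 : PySem.Dict.getD ((PySem.List.pyRange 1 (38+1) 1).foldl (fun tg n =>
        PySem.Dict.modify tg (PySem.Int.mod n 10) [] (fun l => l ++ [(n, PySem.Dict.getD freq n 0)]))
        PySem.Dict.empty) 3 [] = [((3:Int), PySem.Dict.getD freq 3 0), ((13:Int), PySem.Dict.getD freq 13 0), ((23:Int), PySem.Dict.getD freq 23 0), ((33:Int), PySem.Dict.getD freq 33 0)] := by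
    rw [pvGroup freq 3 [3,13,23,33] (by decide)]; rfl
  have hg4 : PySem.Dict.getD ((PySem.List.pyRange 1 (38+1) 1).foldl (fun tg n =>
        PySem.Dict.modify tg (PySem.Int.mod n 10) [] (fun l => l ++ [(n, PySem.Dict.getD freq n 0)]))
        PySem.Dict.empty) 4 [] = [((4:Int), PySem.Dict.getD freq 4 0), ((14:Int), PySem.Dict.getD freq 14 0), ((24:Int), PySem.Dict.getD freq 24 0), ((34:Int), PySem.Dict.getD freq 34 0)] := by
    rw [pvGroup freq 4 [4,14,24,34] (by decide)]; rfl
  have hg5 : PySem.Dict.getD ((PySem.List.pyRange 1 (38+1) 1).foldl (fun tg n =>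
        PySem.Dict.modify tg (PySem.Int.mod n 10) [] (fun l => l ++ [(n, PySem.Dict.getD freq n 0)]))
        PySem.Dict.empty) 5 [] = [((5:Int), PySem.Dict.getD freq 5 0), ((15:Int), PySem.Dict.getD freq 15 0), ((25:Int), PySem.Dict.getD freq 25 0), ((35:Int), PySem.Dict.getD freq 35 0)] := by
    rw [pvGroup freq 5 [5,15,25,35] (by decide)]; rfl
  rw [show PySem.Dict.keys ((PySem.List.pyRange 1 (38+1) 1).foldl (fun tg n =>
        PySem.Dict.modify tg (PySem.Int.mod n 10) [] (fun l => l ++ [(n, PySem.Dict.getD freq n 0)]))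
        PySem.Dict.empty) = [1,2,3,4,5,6,7,8,9,0] from by
      rw [PySem.Dict.keys_foldl_modify_key]; decide,
    show PySem.List.sorted [1,2,3,4,5,6,7,8,9,0] (fun x : Int => x) false = [0,1,2,3,4,5,6,7,8,9] from by decide]
  simp only [List.foldl_cons, List.foldl_nil]
  rw [pvStep_hit _ _ _ _ _ _ (by decide) hg0 (by decide)]
  rw [pvStep_hit _ _ _ _ _ _ (by simp) hg1 (by decide)]
  rw [pvStep_hit _ _ _ _ _ _ (by simp) hg2 (by decide)]
  rw [pvStep_hit _ _ _ _ _ _ (by simp) hg3 (by decide)]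
  rw [pvStep_hit _ _ _ _ _ _ (by simp) hg4 (by decide)]
  rw [pvStep_hit _ _ _ _ _ _ (by simp) hg5 (by decide)]
  rw [pvStep_full _ _ 6 (by simp), pvStep_full _ _ 7 (by simp),
      pvStep_full _ _ 8 (by simp), pvStep_full _ _ 9 (by simp)]
  rw [pvPick3 freq 10 20 30, pvPick4 freq 1 11 21 31, pvPick4 freq 2 12 22 32,
      pvPick4 freq 3 13 23 33, pvPick4 freq 4 14 24 34, pvPick4 freq 5 15 25 35]
  rw [pvFillNop _ _ (by simp)]
  have hsl : ∀ xs : List Int, PySem.List.slice xs none (some 6) = xs.take 6 := fun xs => by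
    simp [pysem]
  rw [hsl]
  rw [show PySem.List.pyRange 0 6 1 = [0,1,2,3,4,5] from by decide]
  simp only [List.map]
  rw [show (PySem.List.pyRange 1 (38+1) 1).filter (fun n => PySem.Int.mod n 10 == (0:Int)) = [10,20,30] from by decide,
      show (PySem.List.pyRange 1 (38+1) 1).filter (fun n => PySem.Int.mod n 10 == (1:Int)) = [1,11,21,31] from by decide,
      show (PySem.List.pyRange 1 (38+1) 1).filter (fun n => PySem.Int.mod n 10 == (2:Int)) = [2,12,22,32] from by decide,
      show (PySem.List.pyRange 1 (38+1) 1).filter (fun n => PySem.Int.mod n 10 == (3:Int)) = [3,13,23,33] from by decide,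
      show (PySem.List.pyRange 1 (38+1) 1).filter (fun n => PySem.Int.mod n 10 == (4:Int)) = [4,14,24,34] from by decide,
      show (PySem.List.pyRange 1 (38+1) 1).filter (fun n => PySem.Int.mod n 10 == (5:Int)) = [5,15,25,35] from by decide]
  simp

theorem pv_main (history : List (List (String × List Int))) :
    method_tail_digit_coverage history = method_tail_digit_coverage_alt history := by
  show pvPickA (pvFreqA history) = pvPickB (pvFreqA history)
  rw [pvPick_eq]

-- ===== VERDICT (by name: the statement is the Claim_ definition above) =====
theorem method_tail_digit_coverage_spec : Claim_equal_method_tail_digit_coverage := by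
  intro history _ _
  show _ = _
  exact pv_main history
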